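-- pv_equiv track=rewrite | github.com/KEYHAN-A/local-ai-agent-orchestrator | src/local_ai_agent_orchestrator/critic_quorum.py | pick_critic_models
-- ===== SOURCE A (Python) =====
-- def pick_critic_models(model_keys: list[str], n: int) -> list[str]:
--     """Choose up to *n* distinct critic model keys, padding by rotation."""
--     cleaned = [k for k in (model_keys or []) if isinstance(k, str) and k.strip()]
--     if not cleaned:
--         return []
--     if len(cleaned) >= n:
--         return cleaned[:n]
--     out = list(cleaned)
--     i = 0
--     while len(out) < n:
--         out.append(cleaned[i % len(cleaned)])
--         i += 1
--     return out
-- ===== SOURCE B (Python) =====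
-- def pick_critic_models(model_keys: list[str], n: int) -> list[str]:
--     """Choose up to *n* distinct critic model keys, padding by rotation."""
--     cleaned = [k for k in (model_keys or []) if isinstance(k, str) and k.strip()]
--     if not cleaned:
--         return []
--     if len(cleaned) >= n:
--         return cleaned[:n]
--     q, r = divmod(n, len(cleaned))
--     return cleaned * q + cleaned[:r]
-- ===== Notes on version B (the rewrite author's own statement) =====
-- stated objective: simpler
-- what changed: The element-by-element rotation while-loop (append cleaned[i % len] until length n) is replaced by a closed-form tiling: q, r = divmod(n, len(cleaned)); return cleaned * q + cleaned[:r].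
import Mathlib
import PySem

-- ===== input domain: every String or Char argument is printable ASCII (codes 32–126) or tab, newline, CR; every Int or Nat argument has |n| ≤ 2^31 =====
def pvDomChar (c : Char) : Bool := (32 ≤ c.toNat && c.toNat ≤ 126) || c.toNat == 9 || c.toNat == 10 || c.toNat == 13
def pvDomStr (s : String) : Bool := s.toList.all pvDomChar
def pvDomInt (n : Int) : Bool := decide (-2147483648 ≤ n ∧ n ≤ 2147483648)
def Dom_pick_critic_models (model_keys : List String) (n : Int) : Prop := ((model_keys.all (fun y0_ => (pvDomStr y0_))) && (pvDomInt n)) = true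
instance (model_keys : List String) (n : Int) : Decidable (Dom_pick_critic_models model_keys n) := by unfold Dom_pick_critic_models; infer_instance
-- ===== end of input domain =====

-- B keeps A's filter and the two guards verbatim but replaces the rotation while-loop
-- by a closed-form divmod tiling (q whole copies of cleaned plus a remainder prefix); objective: simpler.

-- ===== PORT A =====
-- the while-loop of A: append cleaned[i % len(cleaned)] until len(out) = n; fuel = remaining appends
def pickLoop (cleaned : List String) (n : Int) (out : List String) (i : Int) : Nat → List String
  | 0 => out
  | fuel + 1 =>
    if (out.length : Int) < n then
      pickLoop cleaned n (out ++ [PySem.List.pyGetD cleaned (PySem.Int.mod i (cleaned.length : Int)) ""]) (i + 1) fuel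
    else out

def pick_critic_models (model_keys : List String) (n : Int) : List String :=
  let cleaned := model_keys.filter (fun k => PySem.Str.strip k != "")
  if cleaned = [] then []
  else if n ≤ (cleaned.length : Int) then PySem.List.slice cleaned none (some n)
  else pickLoop cleaned n cleaned 0 (n - (cleaned.length : Int)).toNat

-- ===== PORT B =====
def pick_critic_models_alt (model_keys : List String) (n : Int) : List String :=
  let cleaned := model_keys.filter (fun k => PySem.Str.strip k != "")
  if cleaned = [] then []
  else if n ≤ (cleaned.length : Int) then PySem.List.slice cleaned none (some n)
  else
    let q := PySem.Int.floordiv n (cleaned.length : Int)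
    let r := PySem.Int.mod n (cleaned.length : Int)
    (List.replicate q.toNat cleaned).flatten ++ PySem.List.slice cleaned none (some r)

-- ===== PRECONDITION & SPEC =====
def Spec_pick_critic_models (model_keys : List String) (n : Int) (out : List String) : Prop := out = pick_critic_models_alt model_keys n
instance (model_keys : List String) (n : Int) (out : List String) : Decidable (Spec_pick_critic_models model_keys n out) := by unfold Spec_pick_critic_models; infer_instance

-- ===== CLAIM (what is proved, stated in full; the proofs are below) =====
def Claim_equal_pick_critic_models : Prop := ∀ (model_keys : List String) (n : Int), Dom_pick_critic_models model_keys n → Spec_pick_critic_models model_keys n (pick_critic_models model_keys n)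

-- ===== LEMMAS AND PROOFS =====

-- the loop appends the elements cleaned[(i+j) % len] for j = 0 … fuel-1
theorem pickLoop_eq (c : List String) (_hc : 0 < c.length) (n : Int) :
    ∀ (fuel : Nat) (out : List String) (i : Nat), (out.length : Int) + fuel ≤ n →
      pickLoop c n out (i : Int) fuel
        = out ++ (List.range fuel).map (fun j => c.getD ((i + j) % c.length) "") := by
  intro fuel
  induction fuel with
  | zero => intro out i _; simp [pickLoop]
  | succ f ih =>
    intro out i h
    have hlt : (out.length : Int) < n := by push_cast at h ⊢; omega
    rw [pickLoop, if_pos hlt]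
    have hmod : PySem.Int.mod (i : Int) (c.length : Int) = ((i % c.length : Nat) : Int) :=
      PySem.Int.mod_natCast i c.length
    have hget : PySem.List.pyGetD c (PySem.Int.mod (i : Int) (c.length : Int)) "" = c.getD (i % c.length) "" := by
      rw [hmod, PySem.List.pyGetD_natCast]
    have hi1 : ((i : Int) + 1) = ((i + 1 : Nat) : Int) := by push_cast; ring
    rw [hget, hi1, ih (out ++ [c.getD (i % c.length) ""]) (i + 1) (by simp; push_cast at h ⊢; omega)]
    rw [List.range_succ_eq_map, List.map_cons, List.map_map, List.append_assoc]
    simp only [Nat.add_zero, List.cons_append, List.nil_append]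
    congr 1
    congr 1
    apply List.map_congr_left
    intro j _
    have hj : i + 1 + j = i + Nat.succ j := by omega
    simp only [Function.comp]
    rw [hj]

-- first r ≤ len elements of the cyclic sequence form the prefix c.take r
theorem range_map_mod_prefix (c : List String) (r : Nat) (hr : r ≤ c.length) :
    (List.range r).map (fun j => c.getD (j % c.length) "") = c.take r := by
  apply List.ext_getElem
  · simp [Nat.min_eq_left hr]
  · intro m h1 h2
    simp only [List.getElem_map, List.getElem_range, List.getElem_take]
    have hm : m < c.length := by simp at h1; omega
    rw [Nat.mod_eq_of_lt hm, List.getD_eq_getElem c "" hm]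

-- tiling: a*len + r elements of the cyclic sequence = a copies of c plus the prefix of length r
theorem range_map_mod_tile (c : List String) (_hc : 0 < c.length) :
    ∀ (a r : Nat), r ≤ c.length →
      (List.range (a * c.length + r)).map (fun j => c.getD ((j : Nat) % c.length) "")
        = (List.replicate a c).flatten ++ c.take r := by
  intro a
  induction a with
  | zero => intro r hr; simpa using range_map_mod_prefix c r hr
  | succ a ih =>
    intro r hr
    have hsplit : (a + 1) * c.length + r = c.length + (a * c.length + r) := by ring
    rw [hsplit, List.range_add, List.map_append, List.map_map]
    have h1 : (List.range c.length).map (fun j => c.getD (j % c.length) "") = c := by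
      rw [range_map_mod_prefix c c.length le_rfl, List.take_length]
    have h2 : (List.range (a * c.length + r)).map
        ((fun j => c.getD (j % c.length) "") ∘ (c.length + ·))
        = (List.replicate a c).flatten ++ c.take r := by
      rw [← ih r hr]
      apply List.map_congr_left
      intro j _
      simp only [Function.comp]
      congr 1
      exact Nat.add_mod_left _ _
    rw [h1, h2, List.replicate_succ, List.flatten_cons, List.append_assoc]

theorem pick_eq (model_keys : List String) (n : Int) :
    pick_critic_models model_keys n = pick_critic_models_alt model_keys n := by
  unfold pick_critic_models pick_critic_models_alt
  set c := model_keys.filter (fun k => PySem.Str.strip k != "") with hcdef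
  by_cases hc : c = []
  · simp [hc]
  · have hL : 0 < c.length := List.length_pos_iff.mpr hc
    by_cases hle : n ≤ (c.length : Int)
    · simp [hc, hle]
    · simp only [if_neg hc, if_neg hle]
      have hLn : (c.length : Int) < n := by omega
      set q := PySem.Int.floordiv n (c.length : Int) with hq
      set r := PySem.Int.mod n (c.length : Int) with hr
      have hq' : q = n / (c.length : Int) := PySem.Int.floordiv_eq_ediv_of_pos (by exact_mod_cast hL)
      have hr' : r = n % (c.length : Int) := PySem.Int.mod_eq_emod_of_pos (by exact_mod_cast hL)
      have hr0 : 0 ≤ r := by rw [hr']; exact Int.emod_nonneg n (by positivity)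
      have hrL : r < (c.length : Int) := by rw [hr']; exact Int.emod_lt_of_pos n (by exact_mod_cast hL)
      have hnqr : q * (c.length : Int) + r = n := by
        have := Int.mul_ediv_add_emod n (c.length : Int)
        rw [hq', hr']; linarith
      have hq1 : 1 ≤ q := by nlinarith [hnqr, hrL, hLn, hL]
      -- the loop result via pickLoop_eq with i = 0
      have hfuel : ((c.length : Int)) + ((n - (c.length : Int)).toNat : Int) ≤ n := by omega
      have hA := pickLoop_eq c hL n (n - (c.length : Int)).toNat c 0 (by omega)
      simp only [Nat.cast_zero, Nat.zero_add] at hA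
      rw [hA]
      -- express the fuel as (q.toNat - 1) * len + r.toNat
      have hcast : ((((q.toNat - 1) * c.length + r.toNat : Nat)) : Int) = n - (c.length : Int) := by
        have h1 : ((q.toNat - 1 : Nat) : Int) = q - 1 := by omega
        have h2 : ((r.toNat : Nat) : Int) = r := by omega
        rw [Nat.cast_add, Nat.cast_mul, h1, h2]
        linear_combination hnqr
      have hk : (n - (c.length : Int)).toNat = (q.toNat - 1) * c.length + r.toNat := by
        have h3 : (((n - (c.length : Int)).toNat : Nat) : Int)
            = ((((q.toNat - 1) * c.length + r.toNat : Nat)) : Int) := by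
          rw [Int.toNat_of_nonneg (by omega)]; exact hcast.symm
        exact_mod_cast h3
      rw [hk, range_map_mod_tile c hL (q.toNat - 1) r.toNat (by omega)]
      rw [PySem.List.slice_to c hr0]
      have hrep : List.replicate q.toNat c = c :: List.replicate (q.toNat - 1) c := by
        obtain ⟨m, hm⟩ : ∃ m, q.toNat = m + 1 := ⟨q.toNat - 1, by omega⟩
        rw [hm]
        simp [List.replicate_succ]
      rw [hrep, List.flatten_cons, List.append_assoc]

-- ===== VERDICT (by name: the statement is the Claim_ definition above) =====
theorem pick_critic_models_spec : Claim_equal_pick_critic_models := by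
  intro model_keys n _
  unfold Spec_pick_critic_models
  exact pick_eq model_keys n
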